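-- pv_equiv track=rewrite | github.com/alanchancl/IntentLoom | scripts/build_realworld_k8s_tasks.py | _mutate_cidr
-- ===== SOURCE A (Python) =====
-- from typing import Any, Dict, List, Optional, Tuple
--
-- def _cidr_base(cidr: str) -> Optional[Tuple[int, int]]:
--     cidr = cidr.strip()
--     if "/" in cidr:
--         ip_s, pre_s = cidr.split("/", 1)
--     else:
--         ip_s, pre_s = cidr, "32"
--     parts = ip_s.split(".")
--     if len(parts) != 4:
--         return None
--     try:
--         xs = [int(p) for p in parts]
--         pre = int(pre_s)
--     except Exception:
--         return None
--     if any(x < 0 or x > 255 for x in xs) or pre < 0 or pre > 32: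
--         return None
--     base = (xs[0] << 24) | (xs[1] << 16) | (xs[2] << 8) | xs[3]
--     return base, pre
--
-- def _mutate_cidr(cidr: str) -> str:
--     base = _cidr_base(cidr)
--     if base is None:
--         return "192.0.2.0/24"
--     ipi, pre = base
--     ipi = (ipi & 0xFFFFFF00) + 128
--     ip = ".".join(str((ipi >> (24 - 8 * i)) & 0xFF) for i in range(4))
--     return f"{ip}/{pre}"
-- ===== SOURCE B (Python) =====
-- def _mutate_cidr(cidr: str) -> str:
--     cidr = cidr.strip()
--     if "/" in cidr:
--         ip_s, pre_s = cidr.split("/", 1)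
--     else:
--         ip_s, pre_s = cidr, "32"
--     parts = ip_s.split(".")
--     if len(parts) != 4:
--         return "192.0.2.0/24"
--     try:
--         octets = [int(p) for p in parts]
--         pre = int(pre_s)
--     except ValueError:
--         return "192.0.2.0/24"
--     if any(o < 0 or o > 255 for o in octets) or pre < 0 or pre > 32:
--         return "192.0.2.0/24"
--     octets[3] = 128
--     return ".".join(str(o) for o in octets) + "/" + str(pre)
-- ===== Notes on version B (the rewrite author's own statement) =====
-- stated objective: idiomatic
-- what changed: B keeps the exact same parsing/validation but mutates the address directly on the parsed octet list (set the fourth octet to 128 and join the octets), eliminating A's packing of the four octets into a 32-bit integer and its shift/mask unpacking loop.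
import Mathlib
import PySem

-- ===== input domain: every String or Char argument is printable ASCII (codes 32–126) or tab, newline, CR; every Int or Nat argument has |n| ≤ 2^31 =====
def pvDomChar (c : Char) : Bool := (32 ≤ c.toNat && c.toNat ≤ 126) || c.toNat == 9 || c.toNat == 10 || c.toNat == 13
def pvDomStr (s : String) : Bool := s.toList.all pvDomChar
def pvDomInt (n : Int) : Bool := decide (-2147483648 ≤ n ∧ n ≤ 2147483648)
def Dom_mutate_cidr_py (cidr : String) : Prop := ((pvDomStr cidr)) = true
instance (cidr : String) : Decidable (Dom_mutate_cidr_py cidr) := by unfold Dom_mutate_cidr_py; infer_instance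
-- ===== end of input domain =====

-- B rewrites the host-bit mutation on the parsed octet list itself (set the last octet to 128 and
-- join), removing A's packing of the address into one 32-bit integer and its shift/mask unpacking.

-- ===== PORT A =====
-- helper `_cidr_base`: parse and validate, then pack the four octets into one integer
def cidr_base_py (cidr : String) : Option (Int × Int) :=
  let c := PySem.Str.strip cidr
  let sp : String × String :=
    if PySem.Str.isIn "/" c then
      match PySem.Str.splitMax? c "/" 1 with
      | some (ip_s :: pre_s :: _) => (ip_s, pre_s)
      | _ => (c, "32")   -- unreachable: "/" ∈ c gives split(… ,1) exactly two pieces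
    else (c, "32")
  let parts := (PySem.Str.split? sp.1 ".").getD []   -- sep "." ≠ "": split? is always some
  if parts.length ≠ 4 then none
  else
    match parts.mapM PySem.Int.ofStr?, PySem.Int.ofStr? sp.2 with
    | some [x0, x1, x2, x3], some pre =>
      if ([x0, x1, x2, x3].any fun x => decide (x < 0) || decide (x > 255)) ||
          decide (pre < 0) || decide (pre > 32) then none
      else some (PySem.Int.bor (PySem.Int.bor (PySem.Int.bor (x0 <<< (24 : Int)) (x1 <<< (16 : Int))) (x2 <<< (8 : Int))) x3, pre)
    | _, _ => none   -- int() raised (ValueError) → except branch returns None; other list shapes unreachable (length is 4)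

def mutate_cidr_py (cidr : String) : String :=
  match cidr_base_py cidr with
  | none => "192.0.2.0/24"
  | some (ipi0, pre) =>
    let ipi := PySem.Int.band ipi0 0xFFFFFF00 + 128
    let ip := PySem.Str.join "." ((PySem.List.pyRange 0 4 1).map fun i =>
      PySem.Int.toStr (PySem.Int.band (ipi >>> (24 - 8 * i)) 0xFF))
    ip ++ "/" ++ PySem.Int.toStr pre

-- ===== PORT B =====
def mutate_cidr_py_alt (cidr : String) : String :=
  let c := PySem.Str.strip cidr
  let sp : String × String :=
    if PySem.Str.isIn "/" c then
      match PySem.Str.splitMax? c "/" 1 with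
      | some (ip_s :: pre_s :: _) => (ip_s, pre_s)
      | _ => (c, "32")   -- unreachable, as in A
    else (c, "32")
  let parts := (PySem.Str.split? sp.1 ".").getD []   -- sep "." ≠ "": split? is always some
  if parts.length ≠ 4 then "192.0.2.0/24"
  else
    match parts.mapM PySem.Int.ofStr?, PySem.Int.ofStr? sp.2 with
    | some [x0, x1, x2, x3], some pre =>
      if ([x0, x1, x2, x3].any fun o => decide (o < 0) || decide (o > 255)) ||
          decide (pre < 0) || decide (pre > 32) then "192.0.2.0/24"
      else
        let octets := [x0, x1, x2, x3].set 3 128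
        PySem.Str.join "." (octets.map PySem.Int.toStr) ++ "/" ++ PySem.Int.toStr pre
    | _, _ => "192.0.2.0/24"

-- ===== PRECONDITION & SPEC =====
def Spec_mutate_cidr_py (cidr : String) (out : String) : Prop := out = mutate_cidr_py_alt cidr
instance (cidr : String) (out : String) : Decidable (Spec_mutate_cidr_py cidr out) := by unfold Spec_mutate_cidr_py; infer_instance

-- ===== CLAIM (what is proved, stated in full; the proofs are below) =====
def Claim_equal_mutate_cidr_py : Prop := ∀ (cidr : String), Dom_mutate_cidr_py cidr → Spec_mutate_cidr_py cidr (mutate_cidr_py cidr)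

-- ===== LEMMAS AND PROOFS =====

theorem digit_extract (x : Nat) (k : Nat) : (x >>> k) &&& 255 = x / 2 ^ k % 256 := by
  rw [Nat.shiftRight_eq_div_pow]
  exact Nat.and_two_pow_sub_one_eq_mod (x / 2 ^ k) 8

theorem pack_eq_sum (a b c d : Nat) (hb : b < 256) (hc : c < 256) (hd : d < 256) :
    a <<< 24 ||| b <<< 16 ||| c <<< 8 ||| d
      = a * 16777216 + b * 65536 + c * 256 + d := by
  have h8 : c <<< 8 ||| d = c <<< 8 + d := (Nat.shiftLeft_add_eq_or_of_lt hd c).symm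
  have h16 : b <<< 16 ||| (c <<< 8 + d) = b <<< 16 + (c <<< 8 + d) := by
    refine (Nat.shiftLeft_add_eq_or_of_lt ?_ b).symm
    simp [Nat.shiftLeft_eq]; omega
  have h24 : a <<< 24 ||| (b <<< 16 + (c <<< 8 + d)) = a <<< 24 + (b <<< 16 + (c <<< 8 + d)) := by
    refine (Nat.shiftLeft_add_eq_or_of_lt ?_ a).symm
    simp [Nat.shiftLeft_eq]; omega
  rw [Nat.lor_assoc, Nat.lor_assoc, h8, h16, h24]
  simp [Nat.shiftLeft_eq]; ring

theorem mask_clear_low (m d : Nat) (hm : m < 16777216) (hd : d < 256) :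
    (m * 256 + d) &&& 0xFFFFFF00 = m * 256 := by
  have hmask : (0xFFFFFF00 : Nat) = 0xFFFFFF <<< 8 := by decide
  have hsum : m * 256 + d = m <<< 8 ||| d := by
    rw [← Nat.shiftLeft_add_eq_or_of_lt hd, Nat.shiftLeft_eq]
  rw [hsum, hmask, Nat.and_or_distrib_right, ← Nat.shiftLeft_and_distrib]
  have h1 : m &&& 0xFFFFFF = m := by
    have := Nat.and_two_pow_sub_one_eq_mod m 24
    norm_num at this
    rw [this, Nat.mod_eq_of_lt hm]
  have h2 : d &&& (0xFFFFFF <<< 8) = 0 := by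
    have hd' : d = d &&& 255 := by
      have := Nat.and_two_pow_sub_one_eq_mod d 8
      norm_num at this
      rw [this, Nat.mod_eq_of_lt hd]
    rw [hd', Nat.land_assoc]
    simp
  rw [h1, h2]
  simp [Nat.shiftLeft_eq]

theorem ipi_as_cast (a b c d : Nat) (ha : a < 256) (hb : b < 256) (hc : c < 256) (hd : d < 256) :
    PySem.Int.band (PySem.Int.bor (PySem.Int.bor (PySem.Int.bor ((↑a : Int) <<< (24 : Int)) ((↑b : Int) <<< (16 : Int))) ((↑c : Int) <<< (8 : Int))) ↑d) 0xFFFFFF00 + 128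
      = ((a * 65536 + b * 256 + c) * 256 + 128 : Nat) := by
  rw [show (↑a : Int) <<< (24 : Int) = ((a <<< 24 : Nat) : Int) from rfl,
      show (↑b : Int) <<< (16 : Int) = ((b <<< 16 : Nat) : Int) from rfl,
      show (↑c : Int) <<< (8 : Int) = ((c <<< 8 : Nat) : Int) from rfl,
      PySem.Int.bor_natCast, PySem.Int.bor_natCast, PySem.Int.bor_natCast,
      show (0xFFFFFF00 : Int) = ((0xFFFFFF00 : Nat) : Int) from rfl, PySem.Int.band_natCast]
  rw [pack_eq_sum a b c d hb hc hd]
  rw [show a * 16777216 + b * 65536 + c * 256 + d = (a * 65536 + b * 256 + c) * 256 + d by ring]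
  rw [mask_clear_low _ d (by omega) hd]
  push_cast
  ring

theorem int_digit24 (x : Nat) : PySem.Int.band ((↑x : Int) >>> (24 : Int)) 255 = ↑(x / 16777216 % 256) := by
  rw [show (↑x : Int) >>> (24 : Int) = ((x >>> 24 : Nat) : Int) from rfl,
      show (255 : Int) = ((255 : Nat) : Int) from rfl, PySem.Int.band_natCast, digit_extract]
  norm_num

theorem int_digit16 (x : Nat) : PySem.Int.band ((↑x : Int) >>> (16 : Int)) 255 = ↑(x / 65536 % 256) := by
  rw [show (↑x : Int) >>> (16 : Int) = ((x >>> 16 : Nat) : Int) from rfl,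
      show (255 : Int) = ((255 : Nat) : Int) from rfl, PySem.Int.band_natCast, digit_extract]
  norm_num

theorem int_digit8 (x : Nat) : PySem.Int.band ((↑x : Int) >>> (8 : Int)) 255 = ↑(x / 256 % 256) := by
  rw [show (↑x : Int) >>> (8 : Int) = ((x >>> 8 : Nat) : Int) from rfl,
      show (255 : Int) = ((255 : Nat) : Int) from rfl, PySem.Int.band_natCast, digit_extract]
  norm_num

theorem int_digit0 (x : Nat) : PySem.Int.band ((↑x : Int) >>> (0 : Int)) 255 = ↑(x % 256) := by
  rw [show (↑x : Int) >>> (0 : Int) = ((x >>> 0 : Nat) : Int) from rfl,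
      show (255 : Int) = ((255 : Nat) : Int) from rfl, PySem.Int.band_natCast, digit_extract]
  norm_num

-- ===== VERDICT (by name: the statement is the Claim_ definition above) =====
theorem mutate_cidr_py_spec : Claim_equal_mutate_cidr_py := by
  intro cidr _
  unfold Spec_mutate_cidr_py
  show mutate_cidr_py cidr = mutate_cidr_py_alt cidr
  unfold mutate_cidr_py mutate_cidr_py_alt cidr_base_py
  generalize PySem.Str.strip cidr = c
  simp only []
  generalize (if PySem.Str.isIn "/" c = true then
      match PySem.Str.splitMax? c "/" 1 with
      | some (ip_s :: pre_s :: tail) => (ip_s, pre_s)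
      | _ => (c, "32")
    else (c, "32")) = sp
  obtain ⟨ip_s, pre_s⟩ := sp
  generalize ((PySem.Str.split? ip_s ".").getD []) = parts
  by_cases h4 : parts.length ≠ 4
  · simp only [if_pos h4]
  · simp only [if_neg h4]
    cases hm : List.mapM PySem.Int.ofStr? parts with
    | none => simp only []
    | some xs =>
      cases hp : PySem.Int.ofStr? pre_s with
      | none => cases xs with
        | nil => simp only []
        | cons x0 t0 => cases t0 with
          | nil => simp only []
          | cons x1 t1 => cases t1 with
            | nil => simp only []
            | cons x2 t2 => cases t2 with
              | nil => simp only []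
              | cons x3 t3 => cases t3 <;> simp only []
      | some pre =>
        rcases xs with _ | ⟨x0, _ | ⟨x1, _ | ⟨x2, _ | ⟨x3, _ | ⟨x4, t⟩⟩⟩⟩⟩ <;> simp only []
        by_cases hv : (([x0, x1, x2, x3].any fun x => decide (x < 0) || decide (x > 255)) || decide (pre < 0) || decide (pre > 32)) = true
        · simp only [if_pos hv]
        · simp only [if_neg hv]
          simp only [List.any_cons, List.any_nil, Bool.or_eq_true, decide_eq_true_eq] at hv
          simp only [Bool.false_eq_true, or_false, not_or, not_lt, gt_iff_lt] at hv
          obtain ⟨⟨⟨⟨h0l, h0r⟩, ⟨h1l, h1r⟩, ⟨h2l, h2r⟩, ⟨h3l, h3r⟩⟩, -⟩, -⟩ := hv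
          have e0 : x0 = ((x0.toNat : Nat) : Int) := (Int.toNat_of_nonneg h0l).symm
          have e1 : x1 = ((x1.toNat : Nat) : Int) := (Int.toNat_of_nonneg h1l).symm
          have e2 : x2 = ((x2.toNat : Nat) : Int) := (Int.toNat_of_nonneg h2l).symm
          have e3 : x3 = ((x3.toNat : Nat) : Int) := (Int.toNat_of_nonneg h3l).symm
          have ha : x0.toNat < 256 := by omega
          have hb : x1.toNat < 256 := by omega
          have hc : x2.toNat < 256 := by omega
          have hd : x3.toNat < 256 := by omega
          rw [e0, e1, e2, e3]
          rw [show PySem.List.pyRange 0 4 1 = [0, 1, 2, 3] from by decide]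
          simp only [List.map, List.set]
          rw [show (24 - 8 * (0 : Int)) = 24 from by norm_num,
              show (24 - 8 * (1 : Int)) = 16 from by norm_num,
              show (24 - 8 * (2 : Int)) = 8 from by norm_num,
              show (24 - 8 * (3 : Int)) = 0 from by norm_num]
          rw [ipi_as_cast x0.toNat x1.toNat x2.toNat x3.toNat ha hb hc hd,
              int_digit24, int_digit16, int_digit8, int_digit0]
          rw [show ((x0.toNat * 65536 + x1.toNat * 256 + x2.toNat) * 256 + 128) / 16777216 % 256 = x0.toNat from by omega,
              show ((x0.toNat * 65536 + x1.toNat * 256 + x2.toNat) * 256 + 128) / 65536 % 256 = x1.toNat from by omega,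
              show ((x0.toNat * 65536 + x1.toNat * 256 + x2.toNat) * 256 + 128) / 256 % 256 = x2.toNat from by omega,
              show ((x0.toNat * 65536 + x1.toNat * 256 + x2.toNat) * 256 + 128) % 256 = 128 from by omega]
          norm_cast
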